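-- pv_equiv track=rewrite | github.com/kelr/practice-stuff | leetcode/amazon-zombiematrix.py | isAllInfected
-- ===== SOURCE A (Python) =====
-- def isAllInfected(grid):
--     allInfected = True
--     for row in range(len(grid)):
--         for col in range(len(grid[0])):
--             if grid[row][col] == 2:
--                 grid[row][col] = 1
--             if grid[row][col] == 0:
--                 allInfected = False
--     return allInfected
-- ===== SOURCE B (Python) =====
-- def isAllInfected(grid):
--     # Column-wise: the 2 -> 1 cure never creates or removes a 0, so the grid
--     # is fully infected exactly when no column of the matrix contains a 0.
--     # (Pure function of the grid: it does not modify its argument.)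
--     return not any(0 in col for col in zip(*grid))
-- ===== Notes on version B (the rewrite author's own statement) =====
-- stated objective: alternative
-- what changed: The mutating row-major index loop with a flag accumulator is replaced by a pure column-major scan: zip(*grid) transposes the grid and a single any() expression tests whether some column contains a 0 (the 2-to-1 rewrite never affects the zero test, so B drops it; return value only: B does not mutate the grid). Pre_ excludes exactly the ragged grids with a row shorter than the first, on which A raises IndexError.
import Mathlib
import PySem

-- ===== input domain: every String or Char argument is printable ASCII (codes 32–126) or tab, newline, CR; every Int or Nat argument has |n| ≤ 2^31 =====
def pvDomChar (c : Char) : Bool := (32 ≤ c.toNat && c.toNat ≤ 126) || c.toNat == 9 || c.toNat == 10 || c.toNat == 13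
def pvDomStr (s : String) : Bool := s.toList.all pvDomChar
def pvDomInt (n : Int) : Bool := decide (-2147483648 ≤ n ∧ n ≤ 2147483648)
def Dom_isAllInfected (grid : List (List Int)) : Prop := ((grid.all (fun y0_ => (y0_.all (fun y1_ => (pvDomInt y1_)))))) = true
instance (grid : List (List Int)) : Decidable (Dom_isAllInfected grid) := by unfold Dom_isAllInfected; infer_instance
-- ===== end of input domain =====

-- B replaces the mutating row-major flag loop by a pure column-major zip(*grid) scan;
-- the claim is about the RETURN value only (A mutates the grid, B does not).

-- ===== PORT A =====
def isAllInfected (grid : List (List Int)) : Bool :=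
  (PySem.List.pyRange 0 grid.length 1).foldl (fun allInfected row =>
    (PySem.List.pyRange 0 (PySem.List.pyGetD grid 0 []).length 1).foldl (fun acc col =>
      -- grid[row][col] == 2 rewrites the cell to 1; the subsequent read sees the new value
      if (if PySem.List.pyGetD (PySem.List.pyGetD grid row []) col 0 == 2 then (1 : Int)
          else PySem.List.pyGetD (PySem.List.pyGetD grid row []) col 0) == 0 then false else acc)
      allInfected) true

-- ===== PORT B =====
-- zip(*rows): the list of columns, stopping at the shortest row (Python's zip)
def pvCols : List (List Int) → List (List Int)
  | [] => []
  | r :: rs =>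
    if (r :: rs).all (fun x => !x.isEmpty) then
      ((r :: rs).map (fun x => x.headD 0)) :: pvCols ((r :: rs).map (fun x => x.tail))
    else []
termination_by rows => (rows.headD []).length
decreasing_by
  simp only [List.all_cons, Bool.and_eq_true, Bool.not_eq_eq_eq_not, Bool.not_true,
    List.isEmpty_eq_false_iff] at *
  cases r with
  | nil => simp_all
  | cons a as => simp

def isAllInfected_alt (grid : List (List Int)) : Bool :=
  !((pvCols grid).any (fun col => col.contains (0 : Int)))

-- ===== PRECONDITION & SPEC =====
-- Pre_ excludes exactly the ragged grids with a row shorter than the first row,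
-- on which A raises IndexError.
def Pre_isAllInfected (grid : List (List Int)) : Prop :=
  ∀ row ∈ grid, (grid.headD []).length ≤ row.length
instance (grid : List (List Int)) : Decidable (Pre_isAllInfected grid) := by
  unfold Pre_isAllInfected; infer_instance
def pvWitness_isAllInfected : List (List Int) := [[2, 0], [1, 1]]

def Spec_isAllInfected (grid : List (List Int)) (out : Bool) : Prop := out = isAllInfected_alt grid
instance (grid : List (List Int)) (out : Bool) : Decidable (Spec_isAllInfected grid out) := by unfold Spec_isAllInfected; infer_instance

-- ===== CLAIM (what is proved, stated in full; the proofs are below) =====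
def Claim_equal_isAllInfected : Prop := ∀ (grid : List (List Int)), Dom_isAllInfected grid → Pre_isAllInfected grid → Spec_isAllInfected grid (isAllInfected grid)

-- ===== LEMMAS AND PROOFS =====

-- a flag-kill fold is && of pointwise checks
theorem pv_foldl_if_false {α : Type} (p : α → Bool) (l : List α) (acc : Bool) :
    l.foldl (fun a c => if p c then false else a) acc = (acc && l.all (fun c => !p c)) := by
  induction l generalizing acc with
  | nil => simp
  | cons x xs ih =>
    simp only [List.foldl_cons, List.all_cons, ih]
    by_cases h : p x <;> simp [h]

theorem pv_foldl_and {α : Type} (q : α → Bool) (l : List α) (acc : Bool) :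
    l.foldl (fun a x => a && q x) acc = (acc && l.all q) := by
  induction l generalizing acc with
  | nil => simp
  | cons x xs ih => simp [List.foldl_cons, ih, Bool.and_assoc]

theorem pv_all_congr {α : Type} (l : List α) (p q : α → Bool) (h : ∀ x ∈ l, p x = q x) :
    l.all p = l.all q := by
  induction l with
  | nil => rfl
  | cons x xs ih =>
    simp only [List.all_cons, h x (List.mem_cons_self), ih fun y hy => h y (List.mem_cons_of_mem x hy)]

theorem pv_any_congr {α : Type} (l : List α) (p q : α → Bool) (h : ∀ x ∈ l, p x = q x) :
    l.any p = l.any q := by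
  induction l with
  | nil => rfl
  | cons x xs ih =>
    simp only [List.any_cons, h x (List.mem_cons_self), ih fun y hy => h y (List.mem_cons_of_mem x hy)]

theorem pv_any_orb {α : Type} (l : List α) (p q : α → Bool) :
    l.any (fun x => p x || q x) = (l.any p || l.any q) := by
  induction l with
  | nil => rfl
  | cons x xs ih =>
    simp only [List.any_cons, ih]
    by_cases hp : p x <;> by_cases hq : q x <;> simp [hp, hq]

theorem pv_all_not_any {α : Type} (l : List α) (p : α → Bool) :
    l.all (fun x => !p x) = !(l.any p) := by
  induction l with
  | nil => rfl
  | cons x xs ih => simp [List.all_cons, List.any_cons, ih]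

theorem pv_all_index {α : Type} (g : List α) (d : α) (P : α → Bool) :
    (PySem.List.pyRange 0 (g.length : Int) 1).all (fun r => P (PySem.List.pyGetD g r d))
    = g.all P := by
  rw [PySem.List.pyRange_one, List.all_map, Bool.eq_iff_iff]
  simp only [List.all_eq_true, List.mem_range, Function.comp, zero_add, sub_zero,
    Int.toNat_natCast, PySem.List.pyGetD_natCast]
  constructor
  · intro h x hx
    obtain ⟨i, hi, rfl⟩ := List.mem_iff_getElem.1 hx
    have h2 := h i hi
    rwa [List.getD_eq_getElem _ _ hi] at h2
  · intro h k hk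
    rw [List.getD_eq_getElem _ _ hk]
    exact h _ (List.getElem_mem hk)

-- per-row: A's scan of the first w cells detects exactly a 0 among row.take w
theorem pv_row (row : List Int) (w : Nat) (hw : w ≤ row.length) :
    ((PySem.List.pyRange 0 (w : Int) 1).all (fun col =>
      !((if PySem.List.pyGetD row col 0 == 2 then (1 : Int) else PySem.List.pyGetD row col 0) == 0)))
    = !decide ((0 : Int) ∈ row.take w) := by
  rw [Bool.eq_iff_iff]
  simp only [List.all_eq_true, PySem.List.mem_pyRange_one, Bool.not_eq_eq_eq_not, Bool.not_true,
    decide_eq_false_iff_not]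
  rw [List.mem_iff_getElem]
  constructor
  · rintro h ⟨i, hi, hget⟩
    have hiw : i < w := by
      have := List.length_take_le w row; omega
    have hil : i < row.length := by omega
    have h2 := h (i : Int) ⟨by omega, by exact_mod_cast hiw⟩
    rw [PySem.List.pyGetD_natCast, List.getD_eq_getElem row 0 hil] at h2
    rw [List.getElem_take] at hget
    by_cases h2' : row[i] = 2
    · simp [h2'] at h2
      omega
    · simp [h2'] at h2
      exact h2 hget
  · intro h col hc
    obtain ⟨c, rfl⟩ := Int.eq_ofNat_of_zero_le hc.1
    have hcw : c < w := by exact_mod_cast hc.2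
    have hcl : c < row.length := by omega
    rw [PySem.List.pyGetD_natCast, List.getD_eq_getElem row 0 hcl]
    have hne : row[c] ≠ 0 := by
      intro h0
      exact h ⟨c, by simp [List.length_take]; omega, by rw [List.getElem_take]; exact h0⟩
    by_cases h2' : row[c] = 2 <;> simp [h2', hne]

-- A's value on a grid whose rows all reach the first row's width
theorem pv_A_char (grid : List (List Int))
    (hpre : ∀ row ∈ grid, (grid.headD []).length ≤ row.length) :
    isAllInfected grid
      = grid.all (fun row => !decide ((0 : Int) ∈ row.take (grid.headD []).length)) := by
  unfold isAllInfected
  simp only [pv_foldl_if_false, pv_foldl_and, Bool.true_and]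
  cases grid with
  | nil => decide
  | cons r0 rs =>
    rw [PySem.List.pyGetD_zero_cons,
      pv_all_index (r0 :: rs) ([] : List Int)
        (fun row => (PySem.List.pyRange 0 (r0.length : Int) 1).all fun c =>
          !((if PySem.List.pyGetD row c 0 == 2 then (1 : Int) else PySem.List.pyGetD row c 0) == 0))]
    refine pv_all_congr _ _ _ (fun row hrow => ?_)
    exact pv_row row r0.length (by simpa using hpre row hrow)

-- the column scan detects exactly a 0 among the first w cells of some row,
-- when every row has ≥ w cells and the first row exactly w
theorem pv_cols_any (w : Nat) (rows : List (List Int)) (hne : rows ≠ [])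
    (hw : ∀ r ∈ rows, w ≤ r.length) (hh : (rows.headD []).length = w) :
    (pvCols rows).any (fun c => c.contains (0 : Int))
      = rows.any (fun r => decide ((0 : Int) ∈ r.take w)) := by
  induction w generalizing rows with
  | zero =>
    obtain ⟨r, rs, rfl⟩ := List.exists_cons_of_ne_nil hne
    have hr : r = [] := by
      simpa using List.length_eq_zero_iff.mp (by simpa using hh)
    rw [pvCols]
    simp [hr]
  | succ w ih =>
    obtain ⟨r, rs, rfl⟩ := List.exists_cons_of_ne_nil hne
    have hall : (r :: rs).all (fun x => !x.isEmpty) = true := by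
      simp only [List.all_eq_true, Bool.not_eq_eq_eq_not, Bool.not_true, List.isEmpty_eq_false_iff]
      intro x hx
      have := hw x hx
      intro h0; subst h0; simp at this
    rw [pvCols, if_pos hall]
    have htne : (r :: rs).map (fun x => x.tail) ≠ [] := by simp
    have htw : ∀ t ∈ (r :: rs).map (fun x => x.tail), w ≤ t.length := by
      intro t ht
      obtain ⟨x, hx, rfl⟩ := List.mem_map.1 ht
      have := hw x hx
      simp [List.length_tail]
      omega
    have hth : (((r :: rs).map (fun x => x.tail)).headD []).length = w := by
      simp only [List.map_cons, List.headD_cons, List.length_tail]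
      simp only [List.headD_cons] at hh
      omega
    rw [List.any_cons, ih _ htne htw hth, List.any_map, List.contains_eq_any_beq,
      List.any_map, ← pv_any_orb]
    refine (pv_any_congr _ _ _ (fun x hx => ?_)).symm
    have hxne : x ≠ [] := by
      have := hw x hx; intro h0; subst h0; simp at this
    obtain ⟨a, as, rfl⟩ := List.exists_cons_of_ne_nil hxne
    simp only [Function.comp_apply, List.take_succ_cons, List.headD_cons, List.tail_cons]
    rw [Bool.eq_iff_iff]
    simp only [List.mem_cons, decide_eq_true_eq, Bool.or_eq_true, beq_iff_eq]

theorem isAllInfected_spec : Claim_equal_isAllInfected := by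
  intro grid _ hpre
  unfold Spec_isAllInfected isAllInfected_alt
  rw [pv_A_char grid hpre]
  cases grid with
  | nil => rw [pvCols]; decide
  | cons r0 rs =>
    rw [pv_cols_any r0.length (r0 :: rs) (by simp)
      (by intro x hx; simpa using hpre x hx) (by simp),
      pv_all_not_any, List.headD_cons]
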